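-- pv_equiv track=rewrite | github.com/sitaramaprasad-e/pcpt-example | export_rules_for_markup.py | format_md
-- ===== SOURCE A (Python) =====
-- from typing import Any, Dict, List, Iterable
--
-- def format_md(grouped: "OrderedDict[str, List[str]]") -> str:
--     lines: List[str] = []
--     for code_file, rule_names in grouped.items():
--         lines.append(f"### `{code_file}`")
--         for rn in rule_names:
--             lines.append(f"- {rn}")
--         lines.append("")
--     while lines and lines[-1] == "":
--         lines.pop()
--     return "\n".join(lines)
-- ===== SOURCE B (Python) =====
-- def format_md(grouped: "OrderedDict[str, List[str]]") -> str:
--     blocks = []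
--     for code_file, rule_names in grouped.items():
--         blocks.append("\n".join([f"### `{code_file}`"] + [f"- {rn}" for rn in rule_names]))
--     return "\n\n".join(blocks)
-- ===== Notes on version B (the rewrite author's own statement) =====
-- stated objective: simpler
-- what changed: B builds one joined block per file group and joins the blocks with a blank-line separator, eliminating A's trailing empty-string sentinels and the while-pop trim loop.
import Mathlib
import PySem

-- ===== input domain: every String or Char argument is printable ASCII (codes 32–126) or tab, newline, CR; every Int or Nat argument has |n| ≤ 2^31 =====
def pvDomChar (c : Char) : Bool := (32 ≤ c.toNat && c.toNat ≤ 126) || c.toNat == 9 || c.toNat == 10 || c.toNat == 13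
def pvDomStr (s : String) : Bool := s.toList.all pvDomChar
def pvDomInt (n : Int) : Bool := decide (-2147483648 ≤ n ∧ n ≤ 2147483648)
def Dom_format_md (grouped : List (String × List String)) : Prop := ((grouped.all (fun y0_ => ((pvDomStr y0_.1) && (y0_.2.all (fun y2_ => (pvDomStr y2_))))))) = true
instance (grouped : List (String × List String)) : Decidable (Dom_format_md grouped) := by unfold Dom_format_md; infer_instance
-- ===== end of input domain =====

-- B builds one joined block per file group and joins the blocks with a blank-line
-- separator, replacing A's flat line list with "" sentinels and its trailing trim loop.

-- ===== PORT A =====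
-- port of `while lines and lines[-1] == "": lines.pop()`: popping trailing "" elements
-- = dropping the leading "" elements of the reversed list, then reversing back
def pvDropEmpties : List String → List String
  | "" :: rest => pvDropEmpties rest
  | l => l

def pvTrimTrail (l : List String) : List String := (pvDropEmpties l.reverse).reverse

def format_md (grouped : List (String × List String)) : String :=
  let lines : List String :=
    grouped.foldl (fun acc p =>
      (p.2.foldl (fun a rn => a ++ ["- " ++ rn]) (acc ++ ["### `" ++ p.1 ++ "`"])) ++ [""]) []
  PySem.Str.join "\n" (pvTrimTrail lines)

-- ===== PORT B =====
def format_md_alt (grouped : List (String × List String)) : String :=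
  PySem.Str.join "\n\n"
    (grouped.map (fun p =>
      PySem.Str.join "\n" (("### `" ++ p.1 ++ "`") :: p.2.map (fun rn => "- " ++ rn))))

-- ===== PRECONDITION & SPEC =====
def Spec_format_md (grouped : List (String × List String)) (out : String) : Prop := out = format_md_alt grouped
instance (grouped : List (String × List String)) (out : String) : Decidable (Spec_format_md grouped out) := by unfold Spec_format_md; infer_instance

-- ===== CLAIM (what is proved, stated in full; the proofs are below) =====
def Claim_equal_format_md : Prop := ∀ (grouped : List (String × List String)), Dom_format_md grouped → Spec_format_md grouped (format_md grouped)

-- ===== LEMMAS AND PROOFS =====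

-- the lines one group contributes (without A's "" sentinel)
def pvGrpLines (p : String × List String) : List String :=
  ("### `" ++ p.1 ++ "`") :: p.2.map (fun rn => "- " ++ rn)

-- A's line list after the trim: the groups' lines separated by single "" lines
def pvBody : List (String × List String) → List String
  | [] => []
  | [p] => pvGrpLines p
  | p :: ps => pvGrpLines p ++ [""] ++ pvBody ps

lemma pvBody_cons_ne (p : String × List String) (ps : List (String × List String)) :
    pvBody (p :: ps) ≠ [] := by
  cases ps <;> simp [pvBody, pvGrpLines]

lemma foldl_app_map (f : String → String) (l : List String) (init : List String) :
    l.foldl (fun a rn => a ++ [f rn]) init = init ++ l.map f := by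
  induction l generalizing init with
  | nil => simp
  | cons x xs ih => simp [List.foldl_cons, ih]

lemma lines_eq (grouped : List (String × List String)) (init : List String) :
    grouped.foldl (fun acc p =>
      (p.2.foldl (fun a rn => a ++ ["- " ++ rn]) (acc ++ ["### `" ++ p.1 ++ "`"])) ++ [""]) init
      = init ++ grouped.flatMap (fun p => pvGrpLines p ++ [""]) := by
  induction grouped generalizing init with
  | nil => simp
  | cons p ps ih =>
      rw [List.foldl_cons, ih, foldl_app_map]
      simp [pvGrpLines, List.flatMap]

lemma dropEmpties_cons_ne (x : String) (l : List String) (h : x ≠ "") :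
    pvDropEmpties (x :: l) = x :: l := by
  rw [pvDropEmpties.eq_def]
  split
  next heq => cases heq; simp at h
  next => rfl

lemma dropEmpties_append (a b : List String) (h : pvDropEmpties a ≠ []) :
    pvDropEmpties (a ++ b) = pvDropEmpties a ++ b := by
  induction a with
  | nil => simp [pvDropEmpties] at h
  | cons x xs ih =>
      by_cases hx : x = ""
      · subst hx
        simpa [pvDropEmpties] using ih (by simpa [pvDropEmpties] using h)
      · rw [List.cons_append, dropEmpties_cons_ne _ _ hx, dropEmpties_cons_ne _ _ hx,
          List.cons_append]

lemma trim_append_of_ne (a b : List String) (h : pvTrimTrail b ≠ []) :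
    pvTrimTrail (a ++ b) = a ++ pvTrimTrail b := by
  unfold pvTrimTrail at *
  rw [List.reverse_append, dropEmpties_append _ _ (by
    intro hc; apply h; simp [hc]), List.reverse_append, List.reverse_reverse]

lemma trim_append_empty (l : List String) : pvTrimTrail (l ++ [""]) = pvTrimTrail l := by
  unfold pvTrimTrail
  simp [pvDropEmpties]

lemma trim_of_ne (l : List String) (h : ∀ x ∈ l, x ≠ "") : pvTrimTrail l = l := by
  unfold pvTrimTrail
  rw [show pvDropEmpties l.reverse = l.reverse by
    cases hr : l.reverse with
    | nil => rfl
    | cons x xs =>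
        have hx : x ∈ l := by
          have : x ∈ l.reverse := by rw [hr]; exact List.mem_cons_self
          simpa using this
        exact dropEmpties_cons_ne _ _ (h x hx)]
  exact List.reverse_reverse l

lemma grpLines_ne (p : String × List String) : ∀ x ∈ pvGrpLines p, x ≠ "" := by
  intro x hx
  simp only [pvGrpLines, List.mem_cons, List.mem_map] at hx
  rcases hx with h | ⟨rn, _, h⟩ <;> subst h <;>
    · intro h; have := congrArg String.length h; simp [String.length_append] at this

lemma trim_flat (grouped : List (String × List String)) :
    pvTrimTrail (grouped.flatMap (fun p => pvGrpLines p ++ [""])) = pvBody grouped := by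
  induction grouped with
  | nil => simp [pvTrimTrail, pvDropEmpties, pvBody]
  | cons p ps ih =>
      cases ps with
      | nil =>
          simp only [List.flatMap_cons, List.flatMap_nil, List.append_nil]
          rw [trim_append_empty, trim_of_ne _ (grpLines_ne p)]
          rfl
      | cons q qs =>
          rw [List.flatMap_cons,
            trim_append_of_ne _ _ (by rw [ih]; exact pvBody_cons_ne q qs), ih]
          simp [pvBody]

lemma join_append (sep : List Char) (xs ys : List (List Char)) (hx : xs ≠ []) (hy : ys ≠ []) :
    PySem.Chars.join sep (xs ++ ys)
      = PySem.Chars.join sep xs ++ sep ++ PySem.Chars.join sep ys := by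
  induction xs with
  | nil => simp at hx
  | cons a as ih =>
      cases as with
      | nil =>
          cases ys with
          | nil => simp at hy
          | cons b bs =>
              simp [PySem.Chars.join_cons_cons, PySem.Chars.join_singleton]
      | cons a2 as2 =>
          rw [List.cons_append, List.cons_append, PySem.Chars.join_cons_cons,
            ← List.cons_append, ih (by simp), PySem.Chars.join_cons_cons]
          simp

lemma body_join (grouped : List (String × List String)) :
    PySem.Chars.join "\n".toList ((pvBody grouped).map String.toList)
      = (format_md_alt grouped).toList := by
  induction grouped with
  | nil => simp [pvBody, format_md_alt, PySem.Str.toList_join, PySem.Chars.join_nil]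
  | cons p ps ih =>
      cases ps with
      | nil =>
          simp [pvBody, format_md_alt, PySem.Str.toList_join, PySem.Chars.join_singleton,
            pvGrpLines]
      | cons q qs =>
          rw [show pvBody (p :: q :: qs) = pvGrpLines p ++ ([""] ++ pvBody (q :: qs)) by
                simp [pvBody]]
          rw [List.map_append,
            join_append _ _ _ (by simp [pvGrpLines]) (by simp),
            List.map_append,
            join_append _ _ _ (by simp) (by simp [pvBody_cons_ne q qs]), ih]
          rw [show (format_md_alt (p :: q :: qs)).toList
              = PySem.Chars.join "\n".toList ((pvGrpLines p).map String.toList)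
                ++ "\n\n".toList ++ (format_md_alt (q :: qs)).toList by
            unfold format_md_alt
            simp only [List.map_cons, PySem.Str.toList_join, PySem.Chars.join_cons_cons,
              pvGrpLines]]
          simp [PySem.Chars.join_singleton]

-- ===== VERDICT (by name: the statement is the Claim_ definition above) =====
theorem format_md_spec : Claim_equal_format_md := by
  intro grouped _
  unfold Spec_format_md
  show PySem.Str.join "\n" (pvTrimTrail (grouped.foldl (fun acc p =>
      (p.2.foldl (fun a rn => a ++ ["- " ++ rn]) (acc ++ ["### `" ++ p.1 ++ "`"])) ++ [""]) []))
    = format_md_alt grouped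
  rw [lines_eq, List.nil_append, trim_flat]
  apply String.toList_inj.mp
  rw [PySem.Str.toList_join, body_join]
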